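-- pv_equiv track=rewrite | github.com/Maximnida/Homework-Github- | Dars_8/Homework/S10/main.py | naqsh
-- ===== SOURCE A (Python) =====
-- def naqsh(colors):
--     if not colors:
--         return 0
--
--     time = 2
--
--     for i in range(1, len(colors)):
--         if colors[i] != colors[i - 1]:
--             time += 3
--         else:
--             time += 2
--
--     return time
-- ===== SOURCE B (Python) =====
-- def naqsh(colors):
--     n = len(colors)
--     if n == 0:
--         return 0
--     runs = 0
--     i = 0
--     while i < n:
--         head = colors[i]
--         while i < n and colors[i] == head:
--             i += 1
--         runs += 1
--     return 2 * n + runs - 1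
-- ===== Notes on version B (the rewrite author's own statement) =====
-- stated objective: alternative
-- what changed: Instead of a single indexed pass accumulating +3/+2 per adjacent comparison, B splits the list into maximal runs of equal colors with a two-pointer nested-while scan and returns the closed form 2*n + runs - 1.
import Mathlib
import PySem

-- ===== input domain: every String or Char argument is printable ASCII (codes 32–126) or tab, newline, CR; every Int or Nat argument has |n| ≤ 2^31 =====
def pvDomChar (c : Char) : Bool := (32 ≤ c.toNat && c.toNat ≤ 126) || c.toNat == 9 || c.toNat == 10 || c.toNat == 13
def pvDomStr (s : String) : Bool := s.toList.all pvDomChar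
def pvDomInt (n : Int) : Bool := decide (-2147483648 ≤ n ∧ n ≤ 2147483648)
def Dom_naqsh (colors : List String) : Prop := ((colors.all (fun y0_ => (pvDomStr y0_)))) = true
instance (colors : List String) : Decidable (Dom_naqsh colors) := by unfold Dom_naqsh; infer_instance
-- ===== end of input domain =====

-- B splits the list into maximal runs of equal colors with a two-pointer nested-while scan
-- and returns 2*n + runs - 1, instead of A's +3/+2 accumulator pass (objective: alternative).

-- ===== PORT A =====
-- accumulator loop over range(1, len(colors)); colors[i] is always in range, so pyGetD is exact
def naqsh (colors : List String) : Int :=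
  if colors = [] then 0
  else
    (PySem.List.pyRange 1 (colors.length : Int) 1).foldl
      (fun time i =>
        if PySem.List.pyGetD colors i "" ≠ PySem.List.pyGetD colors (i - 1) "" then time + 3
        else time + 2)
      2

-- ===== PORT B =====
-- inner while: `while i < n and colors[i] == head: i += 1`; i < n, so getD is exact
def naqshInner (colors : List String) (head : String) (i : Nat) : Nat :=
  if i < colors.length ∧ colors.getD i "" = head then naqshInner colors head (i + 1) else i
termination_by colors.length - i

-- the inner while never moves i backwards (needed for the outer loop's termination)
theorem naqshInner_le (colors : List String) (head : String) : ∀ (i : Nat), i ≤ naqshInner colors head i := by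
  intro i
  induction i using naqshInner.induct colors head with
  | case1 i h ih => rw [naqshInner, if_pos h]; omega
  | case2 i h => rw [naqshInner, if_neg h]

-- outer while: head = colors[i], the inner loop skips the whole run, runs += 1
def naqshOuter (colors : List String) (i : Nat) : Int :=
  if h : i < colors.length then
    1 + naqshOuter colors (naqshInner colors (colors.getD i "") i)
  else 0
termination_by colors.length - i
decreasing_by
  have h1 : i + 1 ≤ naqshInner colors (colors.getD i "") (i + 1) := naqshInner_le _ _ _
  have h2 : naqshInner colors (colors.getD i "") i = naqshInner colors (colors.getD i "") (i + 1) := by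
    rw [naqshInner, if_pos ⟨h, rfl⟩]
  omega

def naqsh_alt (colors : List String) : Int :=
  if colors.length = 0 then 0
  else 2 * (colors.length : Int) + naqshOuter colors 0 - 1

-- ===== PRECONDITION & SPEC =====
def Spec_naqsh (colors : List String) (out : Int) : Prop := out = naqsh_alt colors
instance (colors : List String) (out : Int) : Decidable (Spec_naqsh colors out) := by unfold Spec_naqsh; infer_instance

-- ===== CLAIM (what is proved, stated in full; the proofs are below) =====
def Claim_equal_naqsh : Prop := ∀ (colors : List String), Dom_naqsh colors → Spec_naqsh colors (naqsh colors)

-- ===== LEMMAS AND PROOFS =====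

-- A's loop, re-indexed to List.range over the tail, computes t + 2*|l| plus the transition count.
theorem naqsh_go (l : List String) : ∀ (x : String) (t : Int),
    (List.range l.length).foldl
      (fun acc k =>
        if (x :: l).getD (k + 1) "" ≠ (x :: l).getD k "" then acc + 3 else acc + 2) t
    = t + 2 * (l.length : Int) + (((x :: l).zip l).countP (fun p => p.1 != p.2) : Int) := by
  induction l with
  | nil => intro x t; simp
  | cons y l ih =>
    intro x t
    rw [List.length_cons, List.range_succ_eq_map, List.foldl_cons, List.foldl_map]
    simp only [List.getD_cons_succ, List.getD_cons_zero]
    have ih' := ih y (if y ≠ x then t + 3 else t + 2)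
    simp only [List.getD_cons_succ] at ih'
    rw [ih']
    simp only [List.zip_cons_cons, List.countP_cons]
    by_cases h : y = x
    · subst h; simp [bne]; ring
    · simp [h, bne_iff_ne, Ne.symm]
      ring

-- a structural (suffix-list) version of B's run counter, used only in the proof
def pvDropRun (head : String) : List String → List String
  | [] => []
  | c :: rest => if c = head then pvDropRun head rest else c :: rest

theorem pvDropRun_length_le (head : String) (l : List String) :
    (pvDropRun head l).length ≤ l.length := by
  induction l with
  | nil => simp [pvDropRun]
  | cons d rest ih =>
    rw [pvDropRun]
    split
    · exact Nat.le_trans ih (Nat.le_succ _)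
    · simp

def runsL : List String → Int
  | [] => 0
  | c :: rest => 1 + runsL (pvDropRun c rest)
termination_by l => l.length
decreasing_by
  simpa using Nat.lt_succ_of_le (pvDropRun_length_le c rest)

theorem runsL_nil : runsL [] = 0 := by rw [runsL]

theorem runsL_cons (c : String) (rest : List String) :
    runsL (c :: rest) = 1 + runsL (pvDropRun c rest) := by rw [runsL]

-- the inner while lands at most at the length, and its landing suffix is the dropRun suffix
theorem naqshInner_drop (colors : List String) (head : String) : ∀ (i : Nat),
    colors.drop (naqshInner colors head i) = pvDropRun head (colors.drop i) := by
  intro i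
  induction i using naqshInner.induct colors head with
  | case1 i h ih =>
    rw [naqshInner, if_pos h]
    obtain ⟨hlt, hget⟩ := h
    rw [ih]
    have hd : colors.drop i = colors.getD i "" :: colors.drop (i + 1) := by
      rw [List.getD_eq_getElem _ _ hlt]
      exact (List.drop_eq_getElem_cons hlt)
    rw [hd, hget, pvDropRun, if_pos rfl]
  | case2 i h =>
    rw [naqshInner, if_neg h]
    by_cases hlt : i < colors.length
    · have hget : ¬ colors.getD i "" = head := fun hg => h ⟨hlt, hg⟩
      have hd : colors.drop i = colors.getD i "" :: colors.drop (i + 1) := by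
        rw [List.getD_eq_getElem _ _ hlt]
        exact (List.drop_eq_getElem_cons hlt)
      rw [hd, pvDropRun, if_neg hget]
    · have hnil : colors.drop i = [] := List.drop_eq_nil_of_le (by omega)
      rw [hnil, pvDropRun]

-- B's index-based outer loop computes runsL of the remaining suffix
theorem naqshOuter_eq_runsL (colors : List String) : ∀ (i : Nat),
    naqshOuter colors i = runsL (colors.drop i) := by
  intro i
  induction i using naqshOuter.induct colors with
  | case1 i h ih =>
    rw [naqshOuter, dif_pos h]
    have hd : colors.drop i = colors.getD i "" :: colors.drop (i + 1) := by
      rw [List.getD_eq_getElem _ _ h]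
      exact (List.drop_eq_getElem_cons h)
    rw [hd, runsL_cons, ih]
    have hstep : naqshInner colors (colors.getD i "") i
        = naqshInner colors (colors.getD i "") (i + 1) := by
      rw [naqshInner, if_pos ⟨h, rfl⟩]
    rw [hstep, naqshInner_drop colors (colors.getD i "") (i + 1)]
  | case2 i h =>
    rw [naqshOuter, dif_neg h]
    rw [List.drop_eq_nil_of_le (by omega), runsL_nil]

-- the run count equals 1 + the adjacent-transition count
theorem runsL_eq_count : ∀ (l : List String) (x : String),
    runsL (pvDropRun x l) = (((x :: l).zip l).countP (fun p => p.1 != p.2) : Int) := by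
  intro l
  induction l with
  | nil => intro x; simp [pvDropRun, runsL_nil]
  | cons y l ih =>
    intro x
    simp only [pvDropRun, List.zip_cons_cons, List.countP_cons]
    by_cases h : y = x
    · subst h
      rw [if_pos rfl, ih y]
      simp
    · rw [if_neg h, runsL_cons]
      rw [ih y]
      have : (x != y) = true := by simp [bne_iff_ne]; exact fun e => h e.symm
      simp [this]
      ring

-- ===== VERDICT (by name: the statement is the Claim_ definition above) =====
theorem naqsh_spec : Claim_equal_naqsh := by
  intro colors _
  unfold Spec_naqsh naqsh naqsh_alt
  cases colors with
  | nil => simp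
  | cons x l =>
    simp only [if_neg (List.cons_ne_nil x l), List.length_cons,
      if_neg (Nat.succ_ne_zero l.length)]
    rw [PySem.List.pyRange_one]
    have hlen : ((((x :: l).length : Int)) - 1).toNat = l.length := by simp
    rw [show ((l.length + 1 : Nat) : Int) = ((x :: l).length : Int) by simp, hlen, List.foldl_map]
    have hstep : ∀ (acc : Int) (k : Nat),
        (if PySem.List.pyGetD (x :: l) (1 + (k : Int)) "" ≠ PySem.List.pyGetD (x :: l) (1 + (k : Int) - 1) "" then acc + 3 else acc + 2)
        = (if (x :: l).getD (k + 1) "" ≠ (x :: l).getD k "" then acc + 3 else acc + 2) := by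
      intro acc k
      have h1 : (1 : Int) + (k : Int) = ((k + 1 : Nat) : Int) := by push_cast; ring
      rw [h1]
      rw [show ((k + 1 : Nat) : Int) - 1 = ((k : Nat) : Int) by omega]
      rw [PySem.List.pyGetD_natCast, PySem.List.pyGetD_natCast]
    simp only [hstep]
    rw [naqsh_go l x 2]
    rw [naqshOuter_eq_runsL (x :: l) 0]
    simp only [List.drop_zero]
    rw [runsL_cons, runsL_eq_count l x]
    simp only [List.length_cons]
    push_cast; ring
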